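-- pv_equiv track=rewrite | github.com/jmtth/callMeBaby | src/JSONStateMachine.py | _is_valid_number_fragment
-- ===== SOURCE A (Python) =====
-- def _is_valid_number_fragment(text: str) -> bool:
--     if text == "":
--         return True
--
--     chars = set("0123456789-.e")
--     if any(ch not in chars for ch in text):
--         return False
--
--     if text.count("e") > 1:
--         return False
--     if text.count(".") > 1:
--         return False
--
--     e_pos = text.find("e")
--     if e_pos != -1 and text.find(".", e_pos) != -1:
--         return False
--
--     if "-" in text:
--         for i, ch in enumerate(text):
--             if ch != "-":
--                 continue
--             if i == 0:
--                 continue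
--             if i > 0 and text[i - 1] == "e":
--                 continue
--             return False
--
--     return True
-- ===== SOURCE B (Python) =====
-- def _is_valid_number_fragment(text: str) -> bool:
--     seen_e = False
--     seen_dot = False
--     prev = None
--     for ch in text:
--         if ch not in "0123456789-.e":
--             return False
--         if ch == "e":
--             if seen_e:
--                 return False
--             seen_e = True
--         elif ch == ".":
--             if seen_dot or seen_e:
--                 return False
--             seen_dot = True
--         elif ch == "-":
--             if prev is not None and prev != "e":
--                 return False
--         prev = ch
--     return True
-- ===== Notes on version B (the rewrite author's own statement) =====
-- stated objective: alternative
-- what changed: Replaced A's five separate scans (set-membership any, two count calls, find/findFrom for dot-after-e, and an enumerate loop for '-') by one left-to-right pass maintaining seen_e, seen_dot and the previous character.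
import Mathlib
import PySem

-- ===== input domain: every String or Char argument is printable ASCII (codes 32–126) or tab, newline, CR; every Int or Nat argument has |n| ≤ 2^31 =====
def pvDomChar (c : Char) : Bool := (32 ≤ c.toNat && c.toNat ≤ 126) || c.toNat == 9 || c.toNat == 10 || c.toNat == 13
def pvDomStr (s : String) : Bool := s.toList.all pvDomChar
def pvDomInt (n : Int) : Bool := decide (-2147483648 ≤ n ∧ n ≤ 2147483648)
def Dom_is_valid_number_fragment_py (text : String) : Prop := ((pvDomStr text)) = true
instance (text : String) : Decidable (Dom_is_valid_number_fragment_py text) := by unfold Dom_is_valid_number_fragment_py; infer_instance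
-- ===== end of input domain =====

-- B replaces A's five separate scans by one left-to-right pass with seen_e/seen_dot/prev state (objective: alternative single-pass decomposition).

-- ===== PORT A =====
def is_valid_number_fragment_py (text : String) : Bool :=
  if text == "" then true
  else
    let chars : PySem.Set Char := PySem.Set.ofList "0123456789-.e".toList
    if text.toList.any (fun ch => !(PySem.Set.contains chars ch)) then false
    else if PySem.Str.count text "e" > 1 then false
    else if PySem.Str.count text "." > 1 then false
    else
      let e_pos : Int := PySem.Str.find text "e"
      if e_pos ≠ -1 ∧ PySem.Str.findFrom text "." e_pos ≠ -1 then false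
      else if PySem.Str.isIn "-" text then
        -- the for-loop over enumerate(text): returns False at the first offending '-', else falls through to True
        if (PySem.List.enumerate text.toList 0).all (fun p =>
              p.2 != '-' || p.1 == 0 || (decide (p.1 > 0) && (PySem.Str.pyGet? text (p.1 - 1) == some 'e')))
        then true else false
      else true

-- ===== PORT B =====
def is_valid_number_fragment_py_alt_loop (se sd : Bool) (prev : Option Char) : List Char → Bool
  | [] => true
  | ch :: rest =>
    if !("0123456789-.e".toList.contains ch) then false
    else if ch == 'e' then
      if se then false else is_valid_number_fragment_py_alt_loop true sd (some ch) rest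
    else if ch == '.' then
      if sd || se then false else is_valid_number_fragment_py_alt_loop se true (some ch) rest
    else if ch == '-' then
      if prev.isSome && prev != some 'e' then false
      else is_valid_number_fragment_py_alt_loop se sd (some ch) rest
    else is_valid_number_fragment_py_alt_loop se sd (some ch) rest

def is_valid_number_fragment_py_alt (text : String) : Bool :=
  is_valid_number_fragment_py_alt_loop false false none text.toList

-- ===== PRECONDITION & SPEC =====
def Spec_is_valid_number_fragment_py (text : String) (out : Bool) : Prop := out = is_valid_number_fragment_py_alt text
instance (text : String) (out : Bool) : Decidable (Spec_is_valid_number_fragment_py text out) := by unfold Spec_is_valid_number_fragment_py; infer_instance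

-- ===== CLAIM (what is proved, stated in full; the proofs are below) =====
def Claim_equal_is_valid_number_fragment_py : Prop := ∀ (text : String), Dom_is_valid_number_fragment_py text → Spec_is_valid_number_fragment_py text (is_valid_number_fragment_py text)

-- ===== LEMMAS AND PROOFS =====

-- allowed characters, as B tests them
def pvAllowed (c : Char) : Bool := "0123456789-.e".toList.contains c

-- "some '.' occurs strictly after some 'e'"
def pvDae : List Char → Bool
  | [] => false
  | c :: r => (c == 'e' && r.contains '.') || pvDae r

-- every '-' is at the very start (prev = none) or right after an 'e'
def pvMinusOk : Option Char → List Char → Bool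
  | _, [] => true
  | prev, c :: r => (!(c == '-') || !prev.isSome || prev == some 'e') && pvMinusOk (some c) r

theorem pvDae_iff (l : List Char) :
    pvDae l = true ↔ ∃ l1 l2, l = l1 ++ 'e' :: l2 ∧ '.' ∈ l2 := by
  induction l with
  | nil => simp [pvDae]
  | cons c r ih =>
    simp only [pvDae, Bool.or_eq_true, Bool.and_eq_true, beq_iff_eq, ih]
    constructor
    · rintro (⟨hc, hd⟩ | ⟨l1, l2, rfl, hd⟩)
      · exact ⟨[], r, by simp [hc], by simpa using hd⟩
      · exact ⟨c :: l1, l2, rfl, hd⟩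
    · rintro ⟨l1, l2, he, hd⟩
      cases l1 with
      | nil => simp at he; exact Or.inl ⟨he.1, by simp [he.2, List.contains_iff_mem]; exact hd⟩
      | cons a t => simp at he; exact Or.inr ⟨t, l2, he.2, hd⟩

theorem pvDae_false_of_not_mem (l : List Char) (h : 'e' ∉ l) : pvDae l = false := by
  induction l with
  | nil => rfl
  | cons c r ih =>
    simp only [List.mem_cons, not_or] at h
    simp [pvDae, ih h.2, h.1, Ne.symm h.1]

-- index characterisation of pvMinusOk
theorem pvMinusOk_iff (l : List Char) (prev : Option Char) :
    pvMinusOk prev l = true ↔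
      ∀ k (hk : k < l.length), l[k] = '-' →
        (k = 0 → prev = none ∨ prev = some 'e') ∧
        (∀ j (hj : j < l.length), k = j + 1 → l[j] = 'e') := by
  induction l generalizing prev with
  | nil => simp [pvMinusOk]
  | cons c r ih =>
    simp only [pvMinusOk, Bool.and_eq_true, ih]
    constructor
    · rintro ⟨h0, hr⟩ k hk hm
      cases k with
      | zero =>
        refine ⟨fun _ => ?_, by omega⟩
        simp only [List.getElem_cons_zero] at hm
        subst hm
        rcases prev with _ | p
        · exact Or.inl rfl
        · simp only [beq_self_eq_true, Bool.not_true, Bool.false_or, Option.isSome_some,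
            Bool.not_true, Bool.false_or] at h0
          simp only [beq_iff_eq, Option.some.injEq] at h0
          exact Or.inr (by rw [h0])
      | succ k =>
        simp only [List.getElem_cons_succ] at hm
        have hk' : k < r.length := by simpa using hk
        have hmain := hr k hk' hm
        refine ⟨by omega, ?_⟩
        rintro j hj hkj
        cases j with
        | zero =>
          -- c must be 'e': from the k = 0 clause of hmain with prev = some c
          have h0' := hmain.1 (by omega)
          simp only [List.getElem_cons_zero]
          rcases h0' with h | h
          · cases h
          · exact (Option.some.inj h)
        | succ j =>
          have hj' : j < r.length := by omega
          have := hmain.2 j hj' (by omega)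
          simpa using this
    · intro h
      constructor
      · by_cases hc : c = '-'
        · have h0 := (h 0 (by simp) (by simpa using hc)).1 rfl
          rcases h0 with h' | h' <;> simp [h']
        · simp [hc]
      · intro k hk hm
        have hk1 : k + 1 < (c :: r).length := by simpa using Nat.succ_lt_succ hk
        have hmain := h (k + 1) hk1 (by simpa using hm)
        constructor
        · intro hk0
          subst hk0
          have hc : c = 'e' := by
            have := hmain.2 0 (by simp) rfl
            simpa using this
          simp [hc]
        · intro j hj hkj
          have := hmain.2 (j + 1) (by simpa using Nat.succ_lt_succ hj) (by omega)
          simpa using this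

theorem pvMinusOk_of_not_mem (l : List Char) (prev : Option Char) (h : '-' ∉ l) :
    pvMinusOk prev l = true := by
  induction l generalizing prev with
  | nil => rfl
  | cons c r ih =>
    simp only [List.mem_cons, not_or] at h
    simp [pvMinusOk, Ne.symm h.1, ih _ h.2]

-- characterisation of B's single pass
theorem pvLoop_iff (l : List Char) (se sd : Bool) (prev : Option Char) :
    is_valid_number_fragment_py_alt_loop se sd prev l = true ↔
      (∀ c ∈ l, pvAllowed c = true) ∧
      l.count 'e' + (cond se 1 0) ≤ 1 ∧
      l.count '.' + (cond sd 1 0) ≤ 1 ∧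
      (se = true → '.' ∉ l) ∧
      pvDae l = false ∧
      pvMinusOk prev l = true := by
  induction l generalizing se sd prev with
  | nil =>
    simp [is_valid_number_fragment_py_alt_loop, pvDae, pvMinusOk]
    cases se <;> cases sd <;> simp
  | cons c r ih =>
    rw [show (is_valid_number_fragment_py_alt_loop se sd prev (c :: r)) =
        (if !("0123456789-.e".toList.contains c) then false
         else if c == 'e' then
           if se then false else is_valid_number_fragment_py_alt_loop true sd (some c) r
         else if c == '.' then
           if sd || se then false else is_valid_number_fragment_py_alt_loop se true (some c) r
         else if c == '-' then
           if prev.isSome && prev != some 'e' then false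
           else is_valid_number_fragment_py_alt_loop se sd (some c) r
         else is_valid_number_fragment_py_alt_loop se sd (some c) r) from rfl]
    by_cases ha : pvAllowed c = true
    case neg =>
      have ha' : ("0123456789-.e".toList.contains c) = false := by
        simpa [pvAllowed] using ha
      rw [ha']
      simp only [Bool.not_false, if_true]
      constructor
      · intro h; exact absurd h (by simp)
      · rintro ⟨hall, -⟩
        exact absurd (hall c (List.mem_cons_self ..)) ha
    case pos =>
    have ha' : ("0123456789-.e".toList.contains c) = true := ha
    rw [ha']
    simp only [Bool.not_true, Bool.false_eq_true, if_false]
    by_cases hce : c = 'e'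
    · subst hce
      rw [if_pos (by simp)]
      cases se with
      | true =>
        rw [if_pos rfl]
        constructor
        · intro h; exact absurd h (by simp)
        · rintro ⟨-, hcnt, -⟩
          simp [List.count_cons] at hcnt
      | false =>
        rw [if_neg (by simp), ih]
        constructor
        · rintro ⟨hall, hce', hcd, hdot, hdae, hmo⟩
          have hdot' : '.' ∉ r := by simpa using hdot
          refine ⟨?_, ?_, ?_, ?_, ?_, ?_⟩
          · intro x hx; rcases List.mem_cons.1 hx with rfl | hx
            · exact ha
            · exact hall x hx
          · simp only [List.count_cons] at hce' ⊢; simp at hce' ⊢; omega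
          · simp only [List.count_cons] at hcd ⊢; simp at hcd ⊢; omega
          · intro h; cases h
          · simp [pvDae, hdae]
            simpa [List.contains_iff_mem] using hdot'
          · simpa [pvMinusOk] using hmo
        · rintro ⟨hall, hce', hcd, -, hdae, hmo⟩
          simp only [pvDae, Bool.or_eq_false_iff, Bool.and_eq_false_iff] at hdae
          refine ⟨fun x hx => hall x (List.mem_cons_of_mem _ hx), ?_, ?_, ?_, hdae.2, ?_⟩
          · simp only [List.count_cons] at hce' ⊢; simp at hce' ⊢; omega
          · simp only [List.count_cons] at hcd ⊢; simp at hcd ⊢; omega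
          · intro _
            rcases hdae.1 with h | h
            · simp at h
            · simpa [List.contains_iff_mem] using h
          · simpa [pvMinusOk] using hmo
    · by_cases hcd : c = '.'
      · subst hcd
        rw [if_neg (by simp), if_pos (by simp)]
        by_cases hsdse : (sd || se) = true
        · rw [if_pos hsdse]
          constructor
          · intro h; exact absurd h (by simp)
          · rintro ⟨-, -, hcnt, hdot, -⟩
            rcases Bool.or_eq_true_iff.1 hsdse with h | h
            · subst h; simp [List.count_cons] at hcnt
            · subst h; exact absurd (List.mem_cons_self ..) (hdot rfl)
        · have hsd : sd = false := by
            rcases sd <;> simp_all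
          have hse : se = false := by
            rcases se <;> simp_all
          subst hsd; subst hse
          rw [if_neg (by simp), ih]
          constructor
          · rintro ⟨hall, hce', hcd', hdot, hdae, hmo⟩
            refine ⟨?_, ?_, ?_, ?_, ?_, ?_⟩
            · intro x hx; rcases List.mem_cons.1 hx with rfl | hx
              · exact ha
              · exact hall x hx
            · simp only [List.count_cons] at hce' ⊢; simp at hce' ⊢; omega
            · simp only [List.count_cons] at hcd' ⊢; simp at hcd' ⊢; omega
            · intro h; cases h
            · simpa [pvDae, hce, Ne.symm hce] using hdae
            · simpa [pvMinusOk] using hmo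
          · rintro ⟨hall, hce', hcd', -, hdae, hmo⟩
            refine ⟨fun x hx => hall x (List.mem_cons_of_mem _ hx), ?_, ?_, ?_, ?_, ?_⟩
            · simp only [List.count_cons] at hce' ⊢; simp at hce' ⊢; omega
            · simp only [List.count_cons] at hcd' ⊢; simp at hcd' ⊢; omega
            · intro h; cases h
            · simpa [pvDae, Ne.symm hce] using hdae
            · simpa [pvMinusOk] using hmo
      · rw [if_neg (by simp [hce]), if_neg (by simp [hcd])]
        have hstep : (if c == '-' then
              if prev.isSome && prev != some 'e' then false
              else is_valid_number_fragment_py_alt_loop se sd (some c) r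
            else is_valid_number_fragment_py_alt_loop se sd (some c) r) = true ↔
            ((c = '-' → prev = none ∨ prev = some 'e') ∧
              is_valid_number_fragment_py_alt_loop se sd (some c) r = true) := by
          by_cases hcm : c = '-'
          · subst hcm
            rw [if_pos (by simp)]
            rcases prev with _ | p
            · simp
            · by_cases hp : p = 'e'
              · subst hp; simp
              · simp [hp]
          · simp [hcm]
        rw [hstep, ih]
        have hcons : pvMinusOk prev (c :: r) = true ↔
            ((c = '-' → prev = none ∨ prev = some 'e') ∧ pvMinusOk (some c) r = true) := by
          simp only [pvMinusOk, Bool.and_eq_true]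
          constructor
          · rintro ⟨h0, hr⟩
            refine ⟨?_, hr⟩
            intro hcm; subst hcm
            simp only [beq_self_eq_true, Bool.not_true, Bool.false_or] at h0
            rcases prev with _ | p
            · exact Or.inl rfl
            · simp at h0; simp [h0]
          · rintro ⟨h0, hr⟩
            refine ⟨?_, hr⟩
            by_cases hcm : c = '-'
            · rcases h0 hcm with h | h <;> simp [hcm, h]
            · simp [hcm]
        constructor
        · rintro ⟨hpm, hall, hce', hcd', hdot, hdae, hmo⟩
          refine ⟨?_, ?_, ?_, ?_, ?_, ?_⟩
          · intro x hx; rcases List.mem_cons.1 hx with rfl | hx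
            · exact ha
            · exact hall x hx
          · simpa [List.count_cons, hce] using hce'
          · simpa [List.count_cons, hcd] using hcd'
          · intro h; simp only [List.mem_cons, not_or]
            exact ⟨fun hh => hcd hh.symm, hdot h⟩
          · simpa [pvDae, hce, Ne.symm hce] using hdae
          · exact hcons.2 ⟨hpm, hmo⟩
        · rintro ⟨hall, hce', hcd', hdot, hdae, hmo⟩
          have hmo' := hcons.1 hmo
          refine ⟨hmo'.1, fun x hx => hall x (List.mem_cons_of_mem _ hx), ?_, ?_, ?_, ?_, hmo'.2⟩
          · simpa [List.count_cons, hce] using hce'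
          · simpa [List.count_cons, hcd] using hcd'
          · intro h
            have := hdot h
            simp only [List.mem_cons, not_or] at this
            exact this.2
          · simp [pvDae, hce] at hdae
            exact hdae

-- with at most one 'e', "some '.' after an 'e'" is exactly "a '.' at/after the first 'e'"
theorem pvDae_drop (l : List Char) (n : Nat)
    (hcnt : l.count 'e' ≤ 1)
    (hpre : ['e'] <+: l.drop n) :
    (pvDae l = true ↔ '.' ∈ l.drop n) := by
  obtain ⟨rest, hrest⟩ := hpre
  have hdrop : l.drop n = 'e' :: rest := by simpa using hrest.symm
  have hl : l = l.take n ++ 'e' :: rest := by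
    conv_lhs => rw [← List.take_append_drop n l]
    rw [hdrop]
  have hsuf : ('e' :: rest) <:+ l := hdrop ▸ List.drop_suffix n l
  rw [pvDae_iff, hdrop]
  constructor
  · rintro ⟨l1, l2, hsplit, hdot⟩
    have hsuf2 : ('e' :: l2) <:+ l := ⟨l1, hsplit.symm⟩
    have hrest_cnt : rest.count 'e' = 0 := by
      have := congrArg (List.count 'e') hl
      simp [List.count_append, List.count_cons] at this
      omega
    have hl2_cnt : l2.count 'e' = 0 := by
      have := congrArg (List.count 'e') hsplit
      simp [List.count_append, List.count_cons] at this
      omega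
    rcases List.suffix_or_suffix_of_suffix hsuf2 hsuf with h | h
    · rcases List.suffix_cons_iff.1 h with h' | h'
      · have : l2 = rest := by injection h'
        subst this
        simp [hdot]
      · have : 'e' ∈ rest := h'.subset (List.mem_cons_self ..)
        have := List.count_pos_iff.2 this
        omega
    · rcases List.suffix_cons_iff.1 h with h' | h'
      · have : rest = l2 := by injection h'
        subst this
        simp [hdot]
      · have : 'e' ∈ l2 := h'.subset (List.mem_cons_self ..)
        have := List.count_pos_iff.2 this
        omega
  · intro hdot
    have hdot' : '.' ∈ rest := by
      rcases List.mem_cons.1 hdot with h | h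
      · cases h
      · exact h
    exact ⟨l.take n, rest, hl, hdot'⟩

-- A's enumerate loop over text agrees with B's prev-tracking '-' condition
theorem pvEnumAll_iff (text : String) :
    ((PySem.List.enumerate text.toList 0).all (fun p =>
        p.2 != '-' || p.1 == 0 ||
          (decide (p.1 > 0) && (PySem.Str.pyGet? text (p.1 - 1) == some 'e')))) = true
      ↔ pvMinusOk none text.toList = true := by
  rw [pvMinusOk_iff, List.all_eq_true]
  constructor
  · intro h k hk hm
    refine ⟨fun _ => Or.inl rfl, ?_⟩
    intro j hj hkj
    subst hkj
    have hmem : ((0 : Int) + (j + 1 : Nat), text.toList[j + 1]) ∈ PySem.List.enumerate text.toList 0 :=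
      (PySem.List.mem_enumerate_iff _ _ _).2 ⟨j + 1, hk, rfl⟩
    have := h _ hmem
    simp only [hm, bne_self_eq_false, Bool.false_or, Bool.or_eq_true, beq_iff_eq,
      Bool.and_eq_true, decide_eq_true_eq] at this
    rcases this with h' | ⟨-, h'⟩
    · omega
    · have hidx : ((0 : Int) + (j + 1 : Nat)) - 1 = (j : Nat) := by push_cast; ring
      rw [hidx, PySem.Str.pyGet?_natCast] at h'
      rw [List.getElem?_eq_getElem hj] at h'
      simpa using h'
  · intro h p hp
    obtain ⟨k, hk, rfl⟩ := (PySem.List.mem_enumerate_iff _ _ _).1 hp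
    by_cases hm : text.toList[k] = '-'
    · have hcl := (h k hk hm).2
      cases k with
      | zero => simp
      | succ k =>
        have hj : k < text.toList.length := by omega
        have he := hcl k hj rfl
        have hidx : ((0 : Int) + (k + 1 : Nat)) - 1 = (k : Nat) := by push_cast; ring
        simp only [Bool.or_eq_true, Bool.and_eq_true, decide_eq_true_eq]
        refine Or.inr ⟨by push_cast; omega, ?_⟩
        rw [hidx, PySem.Str.pyGet?_natCast, List.getElem?_eq_getElem hj]
        simp [he]
    · simp [hm]

-- count of a single-character needle is List.count
theorem pvCount_go_singleton (c : Char) :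
    ∀ (fuel : Nat) (l : List Char) (acc : Nat), l.length ≤ fuel →
      PySem.Chars.count.go [c] fuel l acc = acc + l.count c := by
  intro fuel
  induction fuel with
  | zero =>
    intro l acc h
    have : l = [] := List.length_eq_zero_iff.1 (Nat.le_zero.1 h)
    subst this
    simp [PySem.Chars.count.go]
  | succ n ih =>
    intro l acc h
    cases l with
    | nil => simp [PySem.Chars.count.go]
    | cons x t =>
      rw [show PySem.Chars.count.go [c] (n+1) (x :: t) acc =
        (if List.isPrefixOf [c] (x :: t) then
          PySem.Chars.count.go [c] n (List.drop (List.length [c]) (x :: t)) (acc + 1)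
         else PySem.Chars.count.go [c] n t acc) from rfl]
      have hlen : t.length ≤ n := by simpa using h
      by_cases hx : c = x
      · subst hx
        rw [if_pos (by simp [List.isPrefixOf])]
        have hdrop : List.drop (List.length [c]) (c :: t) = t := by simp
        rw [hdrop, ih t (acc + 1) hlen]
        simp only [List.count_cons, beq_self_eq_true, if_true]
        omega
      · rw [if_neg (by simp [List.isPrefixOf]; exact hx)]
        rw [ih t acc hlen]
        have hxc : (x == c) = false := beq_eq_false_iff_ne.2 (Ne.symm hx)
        simp [List.count_cons, hxc]

theorem pvCount_singleton (l : List Char) (c : Char) :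
    PySem.Chars.count l [c] = l.count c := by
  rw [show PySem.Chars.count l [c] = PySem.Chars.count.go [c] l.length l 0 from rfl]
  simpa using pvCount_go_singleton c l.length l 0 le_rfl

theorem pvInfix_singleton (c : Char) (l : List Char) : [c] <:+: l ↔ c ∈ l := by
  constructor
  · rintro ⟨s, t, rfl⟩; simp
  · intro h
    rcases List.mem_iff_append.1 h with ⟨s, t, rfl⟩
    exact ⟨s, t, by simp⟩


theorem pvToList_e : "e".toList = ['e'] := by decide
theorem pvToList_dot : ".".toList = ['.'] := by decide
theorem pvToList_minus : "-".toList = ['-'] := by decide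

theorem pvA_iff (text : String) :
    is_valid_number_fragment_py text = true ↔
      ((∀ c ∈ text.toList, pvAllowed c = true) ∧
       text.toList.count 'e' ≤ 1 ∧
       text.toList.count '.' ≤ 1 ∧
       pvDae text.toList = false ∧
       pvMinusOk none text.toList = true) := by
  unfold is_valid_number_fragment_py
  by_cases h0 : text = ""
  · subst h0
    simp [pvDae, pvMinusOk]
  · rw [if_neg (by simp [h0])]
    have hAny : (text.toList.any fun ch => !((PySem.Set.ofList "0123456789-.e".toList).contains ch)) = false
        ↔ (∀ c ∈ text.toList, pvAllowed c = true) := by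
      rw [List.any_eq_false]
      have hiff : ∀ c : Char,
          ((!((PySem.Set.ofList "0123456789-.e".toList).contains c)) = false) ↔ pvAllowed c = true := by
        intro c
        rw [Bool.not_eq_false']
        unfold pvAllowed
        rw [PySem.Set.contains_iff, PySem.Set.mem_ofList]
        exact (List.contains_iff_mem).symm
      exact ⟨fun h c hc => (hiff c).1 (Bool.eq_false_iff.2 (h c hc)),
        fun h c hc => Bool.eq_false_iff.1 ((hiff c).2 (h c hc))⟩
    have hCe : PySem.Str.count text "e" = text.toList.count 'e' := by
      rw [PySem.Str.count_eq, pvToList_e, pvCount_singleton]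
    have hCd : PySem.Str.count text "." = text.toList.count '.' := by
      rw [PySem.Str.count_eq, pvToList_dot, pvCount_singleton]
    by_cases h1 : (text.toList.any fun ch => !((PySem.Set.ofList "0123456789-.e".toList).contains ch)) = true
    · rw [if_pos h1]
      constructor
      · intro h; exact absurd h (by simp)
      · rintro ⟨hall, -⟩
        rw [hAny.2 hall] at h1
        exact absurd h1 (by simp)
    · have h1' := Bool.not_eq_true _ ▸ h1
      rw [if_neg h1]
      have hall : ∀ c ∈ text.toList, pvAllowed c = true := hAny.1 (by simpa using h1)
      by_cases hce1 : text.toList.count 'e' ≤ 1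
      · rw [if_neg (by rw [hCe]; omega)]
        by_cases hcd1 : text.toList.count '.' ≤ 1
        · rw [if_neg (by rw [hCd]; omega)]
          -- the find / findFrom stage
          by_cases hf : PySem.Chars.find text.toList ['e'] = -1
          · have hnoe : 'e' ∉ text.toList := by
              have := (PySem.Chars.find_eq_neg_one_iff text.toList ['e']).1 hf
              exact fun hm => this ((pvInfix_singleton 'e' text.toList).2 hm)
            have hdae : pvDae text.toList = false := pvDae_false_of_not_mem _ hnoe
            rw [if_neg (by rw [PySem.Str.find_eq, pvToList_e]; simp [hf])]
            -- the '-' stage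
            by_cases hm : PySem.Str.isIn "-" text = true
            · rw [if_pos hm]
              have : ((if ((PySem.List.enumerate text.toList 0).all fun p =>
                    p.2 != '-' || p.1 == 0 ||
                      (decide (p.1 > 0) && (PySem.Str.pyGet? text (p.1 - 1) == some 'e')))
                  then true else false) = true) ↔ pvMinusOk none text.toList = true := by
                rw [← pvEnumAll_iff]
                split_ifs with h
                · exact iff_of_true rfl h
                · exact iff_of_false (by simp) h
              rw [this]
              constructor
              · intro h; exact ⟨hall, hce1, hcd1, hdae, h⟩
              · rintro ⟨-, -, -, -, h⟩; exact h
            · rw [if_neg hm]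
              have hnom : '-' ∉ text.toList := by
                intro hmem
                apply hm
                rw [PySem.Str.isIn_eq, pvToList_minus, PySem.Chars.isIn_iff_infix]
                exact (pvInfix_singleton '-' text.toList).2 hmem
              simp only [true_iff]
              exact ⟨hall, hce1, hcd1, hdae, pvMinusOk_of_not_mem _ _ hnom⟩
          · have hf0 : 0 ≤ PySem.Chars.find text.toList ['e'] := by
              have := PySem.Chars.neg_one_le_find text.toList ['e']
              omega
            have hfn : PySem.Chars.find text.toList ['e'] =
                ((PySem.Chars.find text.toList ['e']).toNat : Int) :=
              (Int.toNat_of_nonneg hf0).symm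
            have hnlen : (PySem.Chars.find text.toList ['e']).toNat ≤ text.toList.length := by
              have := PySem.Chars.find_le_length text.toList ['e']
              omega
            obtain ⟨hpre, -⟩ := PySem.Chars.find_spec hf0
            have hdaeiff := pvDae_drop text.toList (PySem.Chars.find text.toList ['e']).toNat hce1 hpre
            have hffiff : PySem.Chars.findFrom text.toList ['.']
                  ((PySem.Chars.find text.toList ['e']).toNat : Int) none = -1 ↔
                ¬ '.' ∈ text.toList.drop (PySem.Chars.find text.toList ['e']).toNat := by
              rw [PySem.Chars.findFrom_natCast_eq_neg_one_iff _ _ _ hnlen]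
              constructor
              · exact fun h hm => h ((pvInfix_singleton _ _).2 hm)
              · exact fun h hi => h ((pvInfix_singleton _ _).1 hi)
            by_cases hdot : '.' ∈ text.toList.drop (PySem.Chars.find text.toList ['e']).toNat
            · rw [if_pos ?hc]
              case hc =>
                refine ⟨by rw [PySem.Str.find_eq, pvToList_e]; exact hf, ?_⟩
                rw [PySem.Str.findFrom_eq, pvToList_dot, PySem.Str.find_eq, pvToList_e, hfn]
                intro hcontra
                exact (hffiff.1 hcontra) hdot
              constructor
              · intro h; exact absurd h (by simp)
              · rintro ⟨-, -, -, hdae, -⟩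
                rw [hdaeiff.2 hdot] at hdae
                exact absurd hdae (by simp)
            · have hdae : pvDae text.toList = false := by
                rcases hb : pvDae text.toList with _ | _
                · rfl
                · exact absurd (hdaeiff.1 hb) hdot
              rw [if_neg ?hc]
              case hc =>
                rintro ⟨-, hcontra⟩
                rw [PySem.Str.findFrom_eq, pvToList_dot, PySem.Str.find_eq, pvToList_e, hfn] at hcontra
                exact hcontra (hffiff.2 hdot)
              by_cases hm : PySem.Str.isIn "-" text = true
              · rw [if_pos hm]
                have : ((if ((PySem.List.enumerate text.toList 0).all fun p =>
                      p.2 != '-' || p.1 == 0 ||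
                        (decide (p.1 > 0) && (PySem.Str.pyGet? text (p.1 - 1) == some 'e')))
                    then true else false) = true) ↔ pvMinusOk none text.toList = true := by
                  rw [← pvEnumAll_iff]
                  split_ifs with h
                  · exact iff_of_true rfl h
                  · exact iff_of_false (by simp) h
                rw [this]
                constructor
                · intro h; exact ⟨hall, hce1, hcd1, hdae, h⟩
                · rintro ⟨-, -, -, -, h⟩; exact h
              · rw [if_neg hm]
                have hnom : '-' ∉ text.toList := by
                  intro hmem
                  apply hm
                  rw [PySem.Str.isIn_eq, pvToList_minus, PySem.Chars.isIn_iff_infix]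
                  exact (pvInfix_singleton '-' text.toList).2 hmem
                simp only [true_iff]
                exact ⟨hall, hce1, hcd1, hdae, pvMinusOk_of_not_mem _ _ hnom⟩
        · rw [if_pos (by rw [hCd]; omega)]
          constructor
          · intro h; exact absurd h (by simp)
          · rintro ⟨-, -, h, -⟩; exact absurd h hcd1
      · rw [if_pos (by rw [hCe]; omega)]
        constructor
        · intro h; exact absurd h (by simp)
        · rintro ⟨-, h, -⟩; exact absurd h hce1

-- ===== VERDICT (by name: the statement is the Claim_ definition above) =====
theorem is_valid_number_fragment_py_spec : Claim_equal_is_valid_number_fragment_py := by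
  intro text _
  unfold Spec_is_valid_number_fragment_py
  rw [Bool.eq_iff_iff, pvA_iff]
  unfold is_valid_number_fragment_py_alt
  rw [pvLoop_iff]
  simp only [Bool.cond_false, Nat.add_zero, Bool.false_eq_true, false_implies, true_and,
    and_true, IsEmpty.forall_iff]
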